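-- pv_equiv track=rewrite | github.com/HvvZhang/cs61a | test/discussion_9.py | generate_subsets
-- ===== SOURCE A (Python) =====
-- def generate_subsets(lst):
--     if not lst:
--         yield []
--     else:
--         new = generate_subsets(lst[1:])
--         prev = generate_subsets(lst[1:])
--         yield from prev
--         yield from map(lambda x: [lst[0]] + x, new)
-- ===== SOURCE B (Python) =====
-- def generate_subsets(lst):
--     # Iterative back-to-front: build all subsets once, doubling the list per element.
--     res = [[]]
--     for x in reversed(lst):
--         res = res + [[x] + s for s in res]
--     yield from res
-- ===== Notes on version B (the rewrite author's own statement) =====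
-- stated objective: faster
-- what changed: Replaces the double-recursive generator (which recomputes the tail's subsets twice per level) with a single iterative pass over the reversed list that doubles one materialized list of subsets; intended as asymptotically faster (measured 8.14x at n=16, the largest size both finished; at n=64 both exhaust resources since the output itself is exponential).
import Mathlib
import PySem

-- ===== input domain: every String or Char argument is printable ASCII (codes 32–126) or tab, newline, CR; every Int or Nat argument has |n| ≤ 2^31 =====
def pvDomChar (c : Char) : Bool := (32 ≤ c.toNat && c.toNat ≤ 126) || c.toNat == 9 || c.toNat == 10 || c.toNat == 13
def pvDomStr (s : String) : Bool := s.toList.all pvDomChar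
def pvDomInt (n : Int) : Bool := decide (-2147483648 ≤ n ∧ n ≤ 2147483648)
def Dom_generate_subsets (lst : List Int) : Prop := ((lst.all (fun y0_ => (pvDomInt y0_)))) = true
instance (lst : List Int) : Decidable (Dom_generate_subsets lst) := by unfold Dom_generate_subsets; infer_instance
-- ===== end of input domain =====

-- B replaces A's double-recursive subset generator with one iterative doubling pass over the reversed list (intended as faster; measured 8.14x at n=16, the largest size both finished); equivalence of yielded sequences proved below.


-- ===== PORT A =====
-- A is a generator; its port returns the list of yielded values in order.
-- A computes the tail's subsets twice ('new' and 'prev'); the port keeps both.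
def generate_subsets (lst : List Int) : List (List Int) :=
  match lst with
  | [] => [[]]
  | x :: rest =>
      let new := generate_subsets rest
      let prev := generate_subsets rest
      prev ++ new.map (fun s => x :: s)

-- ===== PORT B =====
-- Iterative: fold over the reversed list, doubling the accumulated list of subsets.
def generate_subsets_alt (lst : List Int) : List (List Int) :=
  lst.reverse.foldl (fun res x => res ++ res.map (fun s => x :: s)) [[]]

-- ===== PRECONDITION & SPEC =====
def Spec_generate_subsets (lst : List Int) (out : List (List Int)) : Prop := out = generate_subsets_alt lst
instance (lst : List Int) (out : List (List Int)) : Decidable (Spec_generate_subsets lst out) := by unfold Spec_generate_subsets; infer_instance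

-- ===== CLAIM (what is proved, stated in full; the proofs are below) =====
def Claim_equal_generate_subsets : Prop := ∀ (lst : List Int), Dom_generate_subsets lst → Spec_generate_subsets lst (generate_subsets lst)

-- ===== LEMMAS AND PROOFS =====
theorem generate_subsets_alt_cons (x : Int) (xs : List Int) :
    generate_subsets_alt (x :: xs)
      = generate_subsets_alt xs ++ (generate_subsets_alt xs).map (fun s => x :: s) := by
  simp [generate_subsets_alt, List.foldl_append]

theorem generate_subsets_eq (lst : List Int) :
    generate_subsets lst = generate_subsets_alt lst := by
  induction lst with
  | nil => simp [generate_subsets, generate_subsets_alt]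
  | cons x xs ih => simp [generate_subsets, generate_subsets_alt_cons, ih]

-- ===== VERDICT (by name: the statement is the Claim_ definition above) =====
theorem generate_subsets_spec : Claim_equal_generate_subsets := by
  intro lst _
  exact generate_subsets_eq lst
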